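-- pv_equiv track=rewrite | github.com/sunbeam-labs/sunbeam | sunbeam/bfx/reports.py | simple_pivot
-- ===== SOURCE A (Python) =====
-- def simple_pivot(triples, id_colname, empty_val):
--     # We need to iterate through triples twice
--     triples = list(triples)
--
--     colnames = {}
--     colnames[id_colname] = None
--     for _, colname, _ in triples:
--         colnames[colname] = None
--     yield list(colnames)
--
--     nrow = 0
--     current_rowname = None
--     current_vals = {}
--     for rowname, colname, val in triples:
--         if rowname != current_rowname:
--             # Emit previous row
--             if nrow > 0:
--                 yield list(current_vals.get(k, empty_val) for k in colnames)
--             # Set up current row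
--             current_rowname = rowname
--             current_vals = {}
--             current_vals[id_colname] = rowname
--
--         current_vals[colname] = val
--         nrow += 1
--
--     # Emit final row if there were any
--     if nrow > 0:
--         yield list(current_vals.get(k, empty_val) for k in colnames)
-- ===== SOURCE B (Python) =====
-- def _runs(triples):
--     """Split triples into consecutive runs of equal rowname: [(rowname, [(colname, val), ...]), ...]."""
--     runs = []
--     for rowname, colname, val in triples:
--         if runs and runs[-1][0] == rowname:
--             runs[-1][1].append((colname, val))
--         else:
--             runs.append((rowname, [(colname, val)]))
--     return runs
--
--
-- def simple_pivot(triples, id_colname, empty_val):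
--     triples = list(triples)
--     colnames = {id_colname: None}
--     for _, colname, _ in triples:
--         colnames[colname] = None
--     yield list(colnames)
--     for rowname, items in _runs(triples):
--         vals = {id_colname: rowname}
--         for colname, val in items:
--             vals[colname] = val
--         yield [vals.get(k, empty_val) for k in colnames]
-- ===== Notes on version B (the rewrite author's own statement) =====
-- stated objective: alternative
-- what changed: A's online state machine (current_rowname/current_vals/nrow, emitting the previous row at each boundary and flushing at the end) is replaced by a group-then-emit decomposition: first split the triples into consecutive runs of equal rowname, then render each run independently as a row dict and emit it.
import Mathlib
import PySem

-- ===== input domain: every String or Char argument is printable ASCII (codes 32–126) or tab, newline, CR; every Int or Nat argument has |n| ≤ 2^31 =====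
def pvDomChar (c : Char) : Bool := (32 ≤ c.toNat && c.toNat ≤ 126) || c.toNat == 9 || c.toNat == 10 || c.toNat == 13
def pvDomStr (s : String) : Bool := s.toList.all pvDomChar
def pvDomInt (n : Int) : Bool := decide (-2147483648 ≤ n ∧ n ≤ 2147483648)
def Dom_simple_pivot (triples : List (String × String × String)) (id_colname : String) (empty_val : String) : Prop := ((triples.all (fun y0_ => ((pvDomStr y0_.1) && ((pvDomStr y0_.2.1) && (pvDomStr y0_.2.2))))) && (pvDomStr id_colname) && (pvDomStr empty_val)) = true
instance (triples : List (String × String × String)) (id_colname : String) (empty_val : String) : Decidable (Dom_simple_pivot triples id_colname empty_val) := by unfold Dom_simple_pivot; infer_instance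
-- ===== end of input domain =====

-- B replaces A's online boundary-detecting state machine by a group-runs-then-emit decomposition (alternative, same cost).

-- ===== PORT A =====
-- A's loop body over (nrow, current_rowname, current_vals, rows-yielded-so-far)
def pvStepA (id_colname empty_val : String) (ck : List String)
    (s : Int × Option String × PySem.Dict String String × List (List String))
    (t : String × String × String) :
    Int × Option String × PySem.Dict String String × List (List String) :=
  let (nrow, cur, vals, rows) := s
  let (rowname, colname, val) := t
  if some rowname ≠ cur then
    let rows' := if nrow > 0 then rows ++ [ck.map (fun k => vals.getD k empty_val)] else rows
    let vals' := ((PySem.Dict.empty).insert id_colname rowname).insert colname val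
    (nrow + 1, some rowname, vals', rows')
  else
    (nrow + 1, cur, vals.insert colname val, rows)

def simple_pivot (triples : List (String × String × String)) (id_colname : String) (empty_val : String) : List (List String) :=
  let colnames : PySem.Dict String Unit :=
    triples.foldl (fun d t => d.insert t.2.1 ()) ((PySem.Dict.empty).insert id_colname ())
  let ck := colnames.keys
  let s := triples.foldl (pvStepA id_colname empty_val ck) (0, none, PySem.Dict.empty, [])
  ck :: (if s.1 > 0 then s.2.2.2 ++ [ck.map (fun k => s.2.2.1.getD k empty_val)] else s.2.2.2)

-- ===== PORT B =====
-- B's _runs loop body: append to the last run if its rowname matches, else start a new run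
def pvStepRuns (runs : List (String × List (String × String))) (t : String × String × String) :
    List (String × List (String × String)) :=
  match runs.getLast? with
  | some l => if l.1 == t.1 then runs.dropLast ++ [(l.1, l.2 ++ [(t.2.1, t.2.2)])]
              else runs ++ [(t.1, [(t.2.1, t.2.2)])]
  | none => [(t.1, [(t.2.1, t.2.2)])]

def pvRuns (triples : List (String × String × String)) : List (String × List (String × String)) :=
  triples.foldl pvStepRuns []

def simple_pivot_alt (triples : List (String × String × String)) (id_colname : String) (empty_val : String) : List (List String) :=
  let colnames : PySem.Dict String Unit :=
    triples.foldl (fun d t => d.insert t.2.1 ()) ((PySem.Dict.empty).insert id_colname ())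
  let ck := colnames.keys
  ck :: (pvRuns triples).map (fun r =>
    let vals := r.2.foldl (fun d cv => d.insert cv.1 cv.2) ((PySem.Dict.empty).insert id_colname r.1)
    ck.map (fun k => vals.getD k empty_val))

-- ===== PRECONDITION & SPEC =====
def Spec_simple_pivot (triples : List (String × String × String)) (id_colname : String) (empty_val : String) (out : List (List String)) : Prop := out = simple_pivot_alt triples id_colname empty_val
instance (triples : List (String × String × String)) (id_colname : String) (empty_val : String) (out : List (List String)) : Decidable (Spec_simple_pivot triples id_colname empty_val out) := by unfold Spec_simple_pivot; infer_instance

-- ===== CLAIM (what is proved, stated in full; the proofs are below) =====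
def Claim_equal_simple_pivot : Prop := ∀ (triples : List (String × String × String)) (id_colname : String) (empty_val : String), Dom_simple_pivot triples id_colname empty_val → Spec_simple_pivot triples id_colname empty_val (simple_pivot triples id_colname empty_val)

-- ===== LEMMAS AND PROOFS =====

-- the dict a run is rendered from, and the row it is rendered to
def pvBuildVals (id_colname : String) (r : String × List (String × String)) : PySem.Dict String String :=
  r.2.foldl (fun d cv => d.insert cv.1 cv.2) ((PySem.Dict.empty).insert id_colname r.1)

def pvEmit (ck : List String) (id_colname empty_val : String) (r : String × List (String × String)) : List String :=
  ck.map (fun k => (pvBuildVals id_colname r).getD k empty_val)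

def pvOutA (ck : List String) (empty_val : String)
    (s : Int × Option String × PySem.Dict String String × List (List String)) : List (List String) :=
  if s.1 > 0 then s.2.2.2 ++ [ck.map (fun k => s.2.2.1.getD k empty_val)] else s.2.2.2

lemma pv_main (ck : List String) (id_colname empty_val : String)
    (L : List (String × String × String)) :
    ∀ (rs : List (String × List (String × String))) (r : String × List (String × String)) (n : Int),
    0 < n →
    pvOutA ck empty_val
      (L.foldl (pvStepA id_colname empty_val ck)
        (n, some r.1, pvBuildVals id_colname r, rs.map (pvEmit ck id_colname empty_val)))
      = (L.foldl pvStepRuns (rs ++ [r])).map (pvEmit ck id_colname empty_val) := by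
  induction L with
  | nil =>
    intro rs r n hn
    simp [pvOutA, hn, pvEmit]
  | cons t L ih =>
    intro rs r n hn
    by_cases h : t.1 = r.1
    · have hstep : pvStepA id_colname empty_val ck
          (n, some r.1, pvBuildVals id_colname r, rs.map (pvEmit ck id_colname empty_val)) t
          = (n + 1, some r.1, (pvBuildVals id_colname r).insert t.2.1 t.2.2,
             rs.map (pvEmit ck id_colname empty_val)) := by
        simp [pvStepA, h]
      have hruns : pvStepRuns (rs ++ [r]) t
          = rs ++ [(r.1, r.2 ++ [(t.2.1, t.2.2)])] := by
        simp [pvStepRuns, h]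
      have hb : (pvBuildVals id_colname r).insert t.2.1 t.2.2
          = pvBuildVals id_colname (r.1, r.2 ++ [(t.2.1, t.2.2)]) := by
        simp [pvBuildVals, List.foldl_append]
      calc pvOutA ck empty_val ((t :: L).foldl (pvStepA id_colname empty_val ck)
              (n, some r.1, pvBuildVals id_colname r, rs.map (pvEmit ck id_colname empty_val)))
          = pvOutA ck empty_val (L.foldl (pvStepA id_colname empty_val ck)
              (n + 1, some r.1, pvBuildVals id_colname (r.1, r.2 ++ [(t.2.1, t.2.2)]),
               rs.map (pvEmit ck id_colname empty_val))) := by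
            rw [List.foldl_cons, hstep, hb]
        _ = ((t :: L).foldl pvStepRuns (rs ++ [r])).map (pvEmit ck id_colname empty_val) := by
            rw [List.foldl_cons, hruns]
            exact ih rs (r.1, r.2 ++ [(t.2.1, t.2.2)]) (n + 1) (by omega)
    · have hstep : pvStepA id_colname empty_val ck
          (n, some r.1, pvBuildVals id_colname r, rs.map (pvEmit ck id_colname empty_val)) t
          = (n + 1, some t.1, pvBuildVals id_colname (t.1, [(t.2.1, t.2.2)]),
             rs.map (pvEmit ck id_colname empty_val) ++ [pvEmit ck id_colname empty_val r]) := by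
        simp [pvStepA, h, hn, pvBuildVals, pvEmit]
      have hruns : pvStepRuns (rs ++ [r]) t
          = (rs ++ [r]) ++ [(t.1, [(t.2.1, t.2.2)])] := by
        simp [pvStepRuns, h]
        intro hc; exact absurd hc.symm h
      calc pvOutA ck empty_val ((t :: L).foldl (pvStepA id_colname empty_val ck)
              (n, some r.1, pvBuildVals id_colname r, rs.map (pvEmit ck id_colname empty_val)))
          = pvOutA ck empty_val (L.foldl (pvStepA id_colname empty_val ck)
              (n + 1, some t.1, pvBuildVals id_colname (t.1, [(t.2.1, t.2.2)]),
               (rs ++ [r]).map (pvEmit ck id_colname empty_val))) := by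
            rw [List.foldl_cons, hstep]; simp
        _ = ((t :: L).foldl pvStepRuns (rs ++ [r])).map (pvEmit ck id_colname empty_val) := by
            rw [List.foldl_cons, hruns]
            exact ih (rs ++ [r]) (t.1, [(t.2.1, t.2.2)]) (n + 1) (by omega)

lemma pv_top (ck : List String) (id_colname empty_val : String)
    (triples : List (String × String × String)) :
    pvOutA ck empty_val (triples.foldl (pvStepA id_colname empty_val ck) (0, none, PySem.Dict.empty, []))
      = (pvRuns triples).map (pvEmit ck id_colname empty_val) := by
  cases triples with
  | nil => simp [pvRuns, pvOutA]
  | cons t L =>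
    have h0 : pvStepA id_colname empty_val ck (0, none, PySem.Dict.empty, []) t
        = (1, some t.1, pvBuildVals id_colname (t.1, [(t.2.1, t.2.2)]),
           List.map (pvEmit ck id_colname empty_val) []) := by
      simp [pvStepA, pvBuildVals]
    have h1 : pvRuns (t :: L) = L.foldl pvStepRuns ([] ++ [(t.1, [(t.2.1, t.2.2)])]) := by
      simp [pvRuns, pvStepRuns]
    rw [List.foldl_cons, h0, h1]
    exact pv_main ck id_colname empty_val L [] (t.1, [(t.2.1, t.2.2)]) 1 (by omega)

-- ===== VERDICT (by name: the statement is the Claim_ definition above) =====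
theorem simple_pivot_spec : Claim_equal_simple_pivot := by
  intro triples id_colname empty_val _
  show simple_pivot triples id_colname empty_val = simple_pivot_alt triples id_colname empty_val
  refine congrArg (List.cons _) ?_
  exact pv_top _ id_colname empty_val triples
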